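-- pv_equiv track=rewrite | github.com/fluffware/pinball_controller | AT91SAM7S/bits.py | build_bits
-- ===== SOURCE A (Python) =====
-- def build_bits(value):
--     bits = 0
--     s = 0;
--     while(s < 24):
--         if (value & 1) != 0:
--             bits |= 6 << s;
--         else:
--             bits |= 4 << s;
--         value >>= 1
--         s += 3
--     return bits
-- ===== SOURCE B (Python) =====
-- _TABLE = [sum((6 if (b >> i) & 1 else 4) << (3 * i) for i in range(8)) for b in range(256)]
--
--
-- def build_bits(value):
--     return _TABLE[value % 256]
-- ===== Notes on version B (the rewrite author's own statement) =====
-- stated objective: alternative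
-- what changed: Replaces the per-bit shift/or loop with a byte-indexed encoding table precomputed at module load, so the function body is a single table lookup at the low byte of value.
import Mathlib
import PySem

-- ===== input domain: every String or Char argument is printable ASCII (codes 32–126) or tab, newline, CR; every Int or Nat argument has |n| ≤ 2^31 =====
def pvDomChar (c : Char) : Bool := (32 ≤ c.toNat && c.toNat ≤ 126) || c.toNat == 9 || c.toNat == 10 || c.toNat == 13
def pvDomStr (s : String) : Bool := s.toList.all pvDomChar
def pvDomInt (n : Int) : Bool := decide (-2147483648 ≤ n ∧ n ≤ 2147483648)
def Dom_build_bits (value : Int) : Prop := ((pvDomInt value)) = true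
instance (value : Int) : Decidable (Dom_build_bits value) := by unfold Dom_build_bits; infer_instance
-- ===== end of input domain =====

-- B replaces A's 8-step encode loop with a 256-entry table built once at load time and a single lookup (objective: alternative/idiomatic).

-- ===== PORT A =====
-- while(s < 24): test bit, or in 6<<s or 4<<s, value >>= 1, s += 3  (fuel 24 only makes the while total; it is never exhausted)
def buildLoopA : Nat → Int → Int → Int → Int
  | 0, bits, _, _ => bits
  | fuel + 1, bits, value, s =>
    if s < 24 then
      buildLoopA fuel
        (PySem.Int.bor bits (if PySem.Int.band value 1 ≠ 0 then (6:Int) <<< s.toNat else (4:Int) <<< s.toNat))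
        (value >>> (1:Nat)) (s + 3)
    else bits

def build_bits (value : Int) : Int := buildLoopA 24 0 value 0

-- ===== PORT B =====
-- _TABLE entry for byte b: sum((6 if (b >> i) & 1 else 4) << (3*i) for i in range(8))
def pvEnc (b : Nat) : Int :=
  (List.range 8).foldl (fun acc i => acc + ((if (b >>> i) &&& 1 ≠ 0 then (6:Int) else 4) <<< (3 * i))) 0

def pvTable : List Int := (List.range 256).map pvEnc

def build_bits_alt (value : Int) : Int :=
  PySem.List.pyGetD pvTable (PySem.Int.mod value 256) 0

-- ===== PRECONDITION & SPEC =====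
def Spec_build_bits (value : Int) (out : Int) : Prop := out = build_bits_alt value
instance (value : Int) (out : Int) : Decidable (Spec_build_bits value out) := by unfold Spec_build_bits; infer_instance

-- ===== CLAIM (what is proved, stated in full; the proofs are below) =====
def Claim_equal_build_bits : Prop := ∀ (value : Int), Dom_build_bits value → Spec_build_bits value (build_bits value)

-- ===== LEMMAS AND PROOFS =====
theorem pv_band1 (v : Int) : PySem.Int.band v 1 = v % 2 := by
  rw [PySem.Int.band_one]; simp [PySem.Int.mod, Int.fmod_eq_emod]

theorem pv_shr1 (v : Int) : v >>> (1:Nat) = v / 2 := by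
  rw [Int.shiftRight_eq_div_pow]; norm_num

theorem pv_mod256 (v : Int) : PySem.Int.mod v 256 = v % 256 := by
  simp [PySem.Int.mod, Int.fmod_eq_emod]

-- A's loop reads only the low 8 bits of value
set_option maxHeartbeats 1000000 in
theorem pv_low8 (v : Int) : buildLoopA 24 0 v 0 = buildLoopA 24 0 (v % 256) 0 := by
  have h0 : (v % 256) % 2 = v % 2 := by omega
  have h1 : (v % 256 / 2) % 2 = (v / 2) % 2 := by omega
  have h2 : (v % 256 / 2 / 2) % 2 = (v / 2 / 2) % 2 := by omega
  have h3 : (v % 256 / 2 / 2 / 2) % 2 = (v / 2 / 2 / 2) % 2 := by omega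
  have h4 : (v % 256 / 2 / 2 / 2 / 2) % 2 = (v / 2 / 2 / 2 / 2) % 2 := by omega
  have h5 : (v % 256 / 2 / 2 / 2 / 2 / 2) % 2 = (v / 2 / 2 / 2 / 2 / 2) % 2 := by omega
  have h6 : (v % 256 / 2 / 2 / 2 / 2 / 2 / 2) % 2 = (v / 2 / 2 / 2 / 2 / 2 / 2) % 2 := by omega
  have h7 : (v % 256 / 2 / 2 / 2 / 2 / 2 / 2 / 2) % 2 = (v / 2 / 2 / 2 / 2 / 2 / 2 / 2) % 2 := by omega
  simp only [buildLoopA, pv_shr1, pv_band1, h0, h1, h2, h3, h4, h5, h6, h7]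
  norm_num

set_option maxRecDepth 100000 in
set_option maxHeartbeats 4000000 in
theorem pv_loop_enc : ∀ m : Nat, m < 256 → buildLoopA 24 0 (m:Int) 0 = pvEnc m := by decide

theorem pv_lookup (m : Nat) (hm : m < 256) : PySem.List.pyGetD pvTable (m:Int) 0 = pvEnc m := by
  rw [PySem.List.pyGetD_natCast]
  have hlen : m < pvTable.length := by simp [pvTable]; omega
  rw [List.getD_eq_getElem _ _ hlen]
  simp [pvTable]

-- ===== VERDICT (by name: the statement is the Claim_ definition above) =====
theorem build_bits_spec : Claim_equal_build_bits := by
  intro v _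
  unfold Spec_build_bits build_bits build_bits_alt
  rw [pv_low8, pv_mod256]
  have hnn : 0 ≤ v % 256 := Int.emod_nonneg v (by norm_num)
  have hlt : v % 256 < 256 := Int.emod_lt_of_pos v (by norm_num)
  have hcast : v % 256 = ((v % 256).toNat : Int) := (Int.toNat_of_nonneg hnn).symm
  rw [hcast, pv_loop_enc _ (by omega), pv_lookup _ (by omega)]
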